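-- pv_equiv track=rewrite | github.com/lilyvalley/insight_project | app.py | map_words_to_stems
-- ===== SOURCE A (Python) =====
-- def map_words_to_stems(list_words, list_roots):
--
--     '''
--     Given a list of words and list of lemmas/stems,
--     return a dictionary with the lemma/stem as keys
--     and a list of words with that lemma/stem as values
--     '''
--
--     dict_roots = {}
--     for word, root in zip(list_words, list_roots):
--
--         #we don't need to store the word if it is not stemmed
--         if root != word:
--
--             #if the lemma/stem is already a key in the dictionary
--             if root in dict_roots:
--
--                 #if the word is not already listed
--                 if word not in dict_roots[root]:
--                     dict_roots[root].append(word)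
--             else:
--                 #add lemma/stem as key and word as value
--                 dict_roots[root] = [word]
--
--     return dict_roots
-- ===== SOURCE B (Python) =====
-- def map_words_to_stems(list_words, list_roots):
--     # Filter-per-key strategy: no incremental grouping dict at all.
--     # Keep the stemmed pairs, list the distinct roots in first-appearance
--     # order, then gather each root's words by a fresh scan of the pairs.
--     pairs = [(w, r) for w, r in zip(list_words, list_roots) if r != w]
--     roots = list(dict.fromkeys(r for _, r in pairs))
--     return {r: list(dict.fromkeys(w for w, r2 in pairs if r2 == r))
--             for r in roots}
-- ===== Notes on version B (the rewrite author's own statement) =====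
-- stated objective: alternative
-- what changed: Replaces A's single incremental grouping loop (dict built key by key with per-word membership checks and appends) by a declarative filter-per-key strategy: materialise the stemmed pairs once, list the distinct roots in first-appearance order, and build each root's value list by an independent filter scan of the pairs deduplicated with dict.fromkeys.
import Mathlib
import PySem

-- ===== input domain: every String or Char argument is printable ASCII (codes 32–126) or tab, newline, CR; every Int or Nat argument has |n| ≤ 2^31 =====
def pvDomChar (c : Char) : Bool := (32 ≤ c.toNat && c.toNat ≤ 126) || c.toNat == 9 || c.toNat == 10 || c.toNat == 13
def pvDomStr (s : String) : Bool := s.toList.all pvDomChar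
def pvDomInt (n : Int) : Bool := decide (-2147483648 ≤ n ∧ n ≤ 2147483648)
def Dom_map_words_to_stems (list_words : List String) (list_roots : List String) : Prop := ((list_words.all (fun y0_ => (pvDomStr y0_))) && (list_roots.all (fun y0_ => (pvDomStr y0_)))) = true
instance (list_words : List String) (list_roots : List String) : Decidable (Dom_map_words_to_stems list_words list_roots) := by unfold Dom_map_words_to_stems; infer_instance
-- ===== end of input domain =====

-- B replaces A's incremental grouping dict by a filter-per-key construction: distinct roots first, then one filter scan of the stemmed pairs per root (alternative decomposition).

-- ===== PORT A =====
def map_words_to_stems (list_words : List String) (list_roots : List String) : List (String × List String) :=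
  ((list_words.zip list_roots).foldl
    (fun (d : PySem.Dict String (List String)) (p : String × String) =>
      if p.2 ≠ p.1 then
        match d.get? p.2 with
        | some ws => if p.1 ∉ ws then d.insert p.2 (ws ++ [p.1]) else d
        | none => d.insert p.2 [p.1]
      else d)
    PySem.Dict.empty).items

-- ===== PORT B =====
def map_words_to_stems_alt (list_words : List String) (list_roots : List String) : List (String × List String) :=
  let pairs := (list_words.zip list_roots).filter (fun p => decide (p.2 ≠ p.1))
  let roots := PySem.List.dedup (pairs.map (fun p => p.2))
  roots.map (fun r =>
    (r, PySem.List.dedup ((pairs.filter (fun p => p.2 == r)).map (fun p => p.1))))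

-- ===== PRECONDITION & SPEC =====
def Spec_map_words_to_stems (list_words : List String) (list_roots : List String) (out : List (String × List String)) : Prop := out = map_words_to_stems_alt list_words list_roots
instance (list_words : List String) (list_roots : List String) (out : List (String × List String)) : Decidable (Spec_map_words_to_stems list_words list_roots out) := by unfold Spec_map_words_to_stems; infer_instance

-- ===== CLAIM (what is proved, stated in full; the proofs are below) =====
def Claim_equal_map_words_to_stems : Prop := ∀ (list_words : List String) (list_roots : List String), Dom_map_words_to_stems list_words list_roots → Spec_map_words_to_stems list_words list_roots (map_words_to_stems list_words list_roots)

-- ===== LEMMAS AND PROOFS =====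

-- proof-only name for A's loop body with the 'root != word' guard stripped
def pvStep (d : PySem.Dict String (List String)) (p : String × String) : PySem.Dict String (List String) :=
  match d.get? p.2 with
  | some ws => if p.1 ∉ ws then d.insert p.2 (ws ++ [p.1]) else d
  | none => d.insert p.2 [p.1]

-- B's value, as a function of the filtered pair list
def pvSpecList (ps : List (String × String)) : List (String × List String) :=
  (PySem.List.dedup (ps.map (fun p => p.2))).map (fun r =>
    (r, PySem.List.dedup ((ps.filter (fun p => p.2 == r)).map (fun p => p.1))))

theorem pv_get?_mk_map (roots : List String) (g : String → List String) (r : String) :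
    (PySem.Dict.mk (roots.map (fun r0 => (r0, g r0)))).get? r
      = if r ∈ roots then some (g r) else none := by
  induction roots with
  | nil => simp [PySem.Dict.get?]
  | cons r0 t ih =>
    rw [List.map_cons, PySem.Dict.get?_mk_cons]
    by_cases h : r0 = r
    · simp [h]
    · have hb : (r0 == r) = false := by simp [h]
      rw [hb]
      simp only [Bool.false_eq_true, if_false, ih, List.mem_cons]
      by_cases hm : r ∈ t
      · simp [hm]
      · simp [hm, Ne.symm h]

theorem pv_filter_eq_nil_of_not_mem (ps : List (String × String)) (r : String)
    (h : r ∉ ps.map (fun p => p.2)) : ps.filter (fun p => p.2 == r) = [] := by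
  rw [List.filter_eq_nil_iff]
  intro p hp hpr
  exact h (List.mem_map.mpr ⟨p, hp, by simpa using hpr⟩)

theorem pv_main (ps : List (String × String)) :
    ps.foldl pvStep PySem.Dict.empty = PySem.Dict.mk (pvSpecList ps) := by
  induction ps using List.reverseRecOn with
  | nil => rfl
  | append_singleton ps q ih =>
    obtain ⟨w, r⟩ := q
    rw [List.foldl_append, List.foldl_cons, List.foldl_nil, ih]
    have hget : (PySem.Dict.mk (pvSpecList ps)).get? r
        = if r ∈ PySem.List.dedup (ps.map (fun p => p.2))
          then some (PySem.List.dedup ((ps.filter (fun p => p.2 == r)).map (fun p => p.1)))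
          else none := by
      unfold pvSpecList
      exact pv_get?_mk_map (PySem.List.dedup (ps.map (fun p => p.2)))
        (fun r0 => PySem.List.dedup ((ps.filter (fun p => p.2 == r0)).map (fun p => p.1))) r
    by_cases hr : r ∈ ps.map (fun p => p.2)
    · -- root already present: the roots list is unchanged
      have hrm : r ∈ PySem.List.dedup (ps.map (fun p => p.2)) :=
        (PySem.List.mem_dedup _ _).mpr hr
      have hroots : PySem.List.dedup ((ps ++ [(w, r)]).map (fun p => p.2))
          = PySem.List.dedup (ps.map (fun p => p.2)) := by
        simp only [List.map_append, List.map_cons, List.map_nil, PySem.List.dedup_eq_ofList]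
        rw [PySem.Set.ofList_append_singleton, PySem.Set.add_eq_ite]
        simp [PySem.Set.mem_ofList, hr]
      rw [if_pos hrm] at hget
      unfold pvStep
      rw [hget]
      simp only
      set ws := PySem.List.dedup ((ps.filter (fun p => p.2 == r)).map (fun p => p.1)) with hws
      by_cases hw : w ∈ ws
      · -- word already listed: nothing changes on either side
        rw [if_neg (by simpa using hw)]
        apply PySem.Dict.ext
        show pvSpecList ps = pvSpecList (ps ++ [(w, r)])
        unfold pvSpecList
        rw [hroots]
        apply List.map_congr_left
        intro r0 _
        by_cases h0 : r0 = r
        · subst h0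
          rw [List.filter_append]
          have hf : List.filter (fun p => p.2 == r0) [(w, r0)] = [(w, r0)] := by simp
          rw [hf, List.map_append, List.map_cons, List.map_nil]
          simp only [PySem.List.dedup_eq_ofList]
          rw [PySem.Set.ofList_append_singleton, PySem.Set.add_eq_ite]
          have hm : w ∈ PySem.Set.ofList ((ps.filter (fun p => p.2 == r0)).map (fun p => p.1)) := by
            rw [← PySem.List.dedup_eq_ofList, ← hws]; exact hw
          simp [hm]
        · rw [List.filter_append]
          have : List.filter (fun p => p.2 == r0) [(w, r)] = [] := by simp [Ne.symm h0]
          simp [this]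
      · -- word is new: A appends it to the stored list, B's dedup picks it up
        rw [if_pos (by simpa using hw)]
        apply PySem.Dict.ext
        rw [PySem.Dict.items_insert]
        have hcont : (PySem.Dict.mk (pvSpecList ps)).contains r = true := by
          rw [PySem.Dict.contains_eq_isSome_get?, hget]; rfl
        rw [if_pos hcont]
        show (pvSpecList ps).map _ = pvSpecList (ps ++ [(w, r)])
        unfold pvSpecList
        rw [hroots, List.map_map]
        apply List.map_congr_left
        intro r0 _
        by_cases h0 : r0 = r
        · subst h0
          simp only [Function.comp, beq_self_eq_true, if_pos]
          rw [List.filter_append]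
          have hf : List.filter (fun p => p.2 == r0) [(w, r0)] = [(w, r0)] := by simp
          rw [hf, List.map_append, List.map_cons, List.map_nil]
          simp only [PySem.List.dedup_eq_ofList]
          rw [PySem.Set.ofList_append_singleton, PySem.Set.add_eq_ite]
          have hm : w ∉ PySem.Set.ofList ((ps.filter (fun p => p.2 == r0)).map (fun p => p.1)) := by
            rw [← PySem.List.dedup_eq_ofList, ← hws]; exact hw
          rw [if_neg hm]
          simp [hws]
        · have hne : (r0 == r) = false := by simp [h0]
          simp only [Function.comp, hne, if_neg, Bool.false_eq_true, not_false_eq_true]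
          rw [List.filter_append]
          have : List.filter (fun p => p.2 == r0) [(w, r)] = [] := by simp [Ne.symm h0]
          simp [this]
    · -- new root: both sides append a fresh entry
      have hrm : r ∉ PySem.List.dedup (ps.map (fun p => p.2)) := fun h =>
        hr ((PySem.List.mem_dedup _ _).mp h)
      rw [if_neg hrm] at hget
      unfold pvStep
      rw [hget]
      apply PySem.Dict.ext
      rw [PySem.Dict.items_insert]
      have hcont : (PySem.Dict.mk (pvSpecList ps)).contains r = false := by
        rw [PySem.Dict.contains_eq_isSome_get?, hget]; rfl
      rw [if_neg (by simp [hcont])]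
      show pvSpecList ps ++ [(r, [w])] = pvSpecList (ps ++ [(w, r)])
      unfold pvSpecList
      have hroots : PySem.List.dedup ((ps ++ [(w, r)]).map (fun p => p.2))
          = PySem.List.dedup (ps.map (fun p => p.2)) ++ [r] := by
        simp only [List.map_append, List.map_cons, List.map_nil, PySem.List.dedup_eq_ofList]
        rw [PySem.Set.ofList_append_singleton, PySem.Set.add_eq_ite]
        simp [PySem.Set.mem_ofList, hr]
      rw [hroots, List.map_append, List.map_cons, List.map_nil]
      congr 1
      · apply List.map_congr_left
        intro r0 hr0
        have h0 : r0 ≠ r := fun h => hrm (h ▸ hr0)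
        rw [List.filter_append]
        have : List.filter (fun p => p.2 == r0) [(w, r)] = [] := by simp [Ne.symm h0]
        simp [this]
      · rw [List.filter_append, pv_filter_eq_nil_of_not_mem ps r hr]
        simp [PySem.List.dedup_eq_ofList, PySem.Set.ofList, PySem.Set.add]

-- ===== VERDICT (by name: the statement is the Claim_ definition above) =====
theorem map_words_to_stems_spec : Claim_equal_map_words_to_stems := by
  intro lw lr _
  show map_words_to_stems lw lr = map_words_to_stems_alt lw lr
  unfold map_words_to_stems map_words_to_stems_alt
  rw [show (fun (d : PySem.Dict String (List String)) (p : String × String) =>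
      if p.2 ≠ p.1 then
        match d.get? p.2 with
        | some ws => if p.1 ∉ ws then d.insert p.2 (ws ++ [p.1]) else d
        | none => d.insert p.2 [p.1]
      else d) = (fun d p => if p.2 ≠ p.1 then pvStep d p else d) from rfl]
  rw [PySem.List.foldl_ite_eq_foldl_filter (p := fun (p : String × String) => p.2 ≠ p.1)
    (f := pvStep) (l := lw.zip lr)]
  rw [pv_main]
  rfl
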